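-- pv_equiv track=rewrite | github.com/ankurbhambri/DS-Algo | string/sum_distinct_char.py | solution
-- ===== SOURCE A (Python) =====
-- def solution(ss):
--     dd = {}
--     n = len(ss)
--     tmp = 1
--     count = 0
--     dd[ss[0]] = 1
--     for i in range(n):
--         tmp += 1 + i - dd.get(ss[i], 0)
--         dd[ss[i]] = i + 1
--         count += tmp
--     return count
-- ===== SOURCE B (Python) =====
-- def solution(ss):
--     n = len(ss)
--     last = {}
--     total = 0
--     for i, c in enumerate(ss):
--         total += (i - last.get(c, -1)) * (n - i)
--         last[c] = i
--     return total
-- ===== Notes on version B (the rewrite author's own statement) =====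
-- stated objective: alternative
-- what changed: Replaces A's running prefix accumulator tmp (sum of distinct counts of substrings ending at i, re-summed into count) by a direct per-occurrence closed count: each position i contributes (i - last_occurrence) * (n - i) to the total in a single pass, with no pre-seeded dict entry and no secondary accumulator.
-- crash fix: On the empty string A raises IndexError at ss[0]; B returns 0, the sum over zero substrings. — e.g. on solution(""): A raises IndexError, B returns 0
import Mathlib
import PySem

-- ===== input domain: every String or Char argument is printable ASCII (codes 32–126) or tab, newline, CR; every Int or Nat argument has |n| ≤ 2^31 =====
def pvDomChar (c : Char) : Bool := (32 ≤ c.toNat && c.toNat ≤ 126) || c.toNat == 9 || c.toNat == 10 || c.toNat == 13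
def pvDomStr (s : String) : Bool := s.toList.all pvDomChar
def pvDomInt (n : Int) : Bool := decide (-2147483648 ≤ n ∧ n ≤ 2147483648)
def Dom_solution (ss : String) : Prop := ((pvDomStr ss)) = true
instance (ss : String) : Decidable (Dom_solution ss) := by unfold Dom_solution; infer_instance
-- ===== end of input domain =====

-- B replaces A's running prefix accumulator (tmp, re-summed into count) by a direct
-- per-occurrence closed count (i - last) * (n - i) in one pass: alternative decomposition,
-- same O(n) cost. Equivalence is proved for nonempty strings (A raises IndexError on "").

-- ===== PORT A =====
-- A's loop 'for i in range(n)' reading ss[i], transcribed as structural recursion over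
-- ss.toList carrying the index i (ss[i] is exactly the head at each step); state = (dd, tmp, count).
def solutionLoop : List Char → Int → PySem.Dict Char Int → Int → Int → Int
  | [], _, _, _, count => count
  | c :: cs, i, dd, tmp, count =>
      let tmp' := tmp + (1 + i - dd.getD c 0)
      solutionLoop cs (i + 1) (dd.insert c (i + 1)) tmp' (count + tmp')

def solution (ss : String) : Int :=
  match ss.toList with
  | [] => 0  -- Python raises IndexError at dd[ss[0]] here; excluded by Pre_solution
  | c0 :: _ => solutionLoop ss.toList 0 (PySem.Dict.empty.insert c0 1) 1 0

-- ===== PORT B =====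
-- B's 'for i, c in enumerate(ss)' transcribed as structural recursion carrying i; state = (last, total).
def solutionAltLoop : List Char → Int → Int → PySem.Dict Char Int → Int → Int
  | [], _, _, _, total => total
  | c :: cs, i, n, last, total =>
      solutionAltLoop cs (i + 1) n (last.insert c i) (total + (i - last.getD c (-1)) * (n - i))

def solution_alt (ss : String) : Int :=
  solutionAltLoop ss.toList 0 (ss.toList.length : Int) PySem.Dict.empty 0

-- ===== PRECONDITION & SPEC =====
-- A evaluates ss[0] before its loop, so it raises IndexError on the empty string; that is the
-- only input excluded.
def Pre_solution (ss : String) : Prop := ss.toList ≠ []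
instance (ss : String) : Decidable (Pre_solution ss) := by unfold Pre_solution; infer_instance
def pvWitness_solution : String := "ab"

-- On the empty string A raises IndexError at ss[0]; B returns 0, the sum over zero substrings.
def Raises_solution (ss : String) : Prop := ss.toList = []
instance (ss : String) : Decidable (Raises_solution ss) := by unfold Raises_solution; infer_instance
def pvRaiseWitness_solution : String := ""
def pvRaiseWitnessOut_solution : Int := 0

def Spec_solution (ss : String) (out : Int) : Prop := out = solution_alt ss
instance (ss : String) (out : Int) : Decidable (Spec_solution ss out) := by unfold Spec_solution; infer_instance

-- ===== CLAIM (what is proved, stated in full; the proofs are below) =====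
def Claim_equal_solution : Prop := ∀ (ss : String), Dom_solution ss → Pre_solution ss → Spec_solution ss (solution ss)
def Claim_raises_solution : Prop := (∀ (ss : String), Dom_solution ss → Raises_solution ss → ¬ Pre_solution ss) ∧ (Dom_solution (pvRaiseWitness_solution) ∧ Raises_solution (pvRaiseWitness_solution) ∧ solution_alt (pvRaiseWitness_solution) = pvRaiseWitnessOut_solution)

-- ===== LEMMAS AND PROOFS =====

-- Invariant linking the two loop states over the remaining suffix cs at position i:
-- dd stores last-index+1 where last stores the last index, and
-- total = count + |cs| * tmp  (tmp is B's pending contribution spread over the remaining positions).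
lemma loop_eq (cs : List Char) : ∀ (i n tmp count total : Int)
    (dd last : PySem.Dict Char Int),
    n = i + cs.length →
    (∀ c, dd.getD c 0 = last.getD c (-1) + 1) →
    total = count + (cs.length : Int) * tmp →
    solutionLoop cs i dd tmp count = solutionAltLoop cs i n last total := by
  induction cs with
  | nil =>
      intro i n tmp count total dd last hn hdd htot
      simp [solutionLoop, solutionAltLoop, htot]
  | cons c cs ih =>
      intro i n tmp count total dd last hn hdd htot
      simp only [solutionLoop, solutionAltLoop]
      apply ih
      · simp at hn ⊢; omega
      · intro c'
        by_cases h : c' = c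
        · subst h
          rw [PySem.Dict.getD_insert, PySem.Dict.getD_insert]; simp
        · rw [PySem.Dict.getD_insert, PySem.Dict.getD_insert]
          simp [h, hdd c']
      · have hp := hdd c
        have hlen : (n : Int) - i = (cs.length : Int) + 1 := by
          simp at hn; omega
        simp only [List.length_cons] at htot
        rw [hlen, htot, hp]
        push_cast
        ring

theorem solution_eq_alt (ss : String) (h : ss.toList ≠ []) : solution ss = solution_alt ss := by
  unfold solution solution_alt
  obtain ⟨c0, cs, hcs⟩ : ∃ c0 cs, ss.toList = c0 :: cs := by
    cases hx : ss.toList with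
    | nil => exact absurd hx h
    | cons a b => exact ⟨a, b, rfl⟩
  rw [hcs]
  -- unfold one iteration of each loop; at i = 1 the invariant of loop_eq holds.
  simp only [solutionLoop, solutionAltLoop]
  rw [PySem.Dict.getD_insert]
  apply loop_eq
  · simp; omega
  · intro c'
    by_cases hc : c' = c0
    · subst hc
      rw [PySem.Dict.getD_insert, PySem.Dict.getD_insert, PySem.Dict.getD_insert]
      simp
    · rw [PySem.Dict.getD_insert, PySem.Dict.getD_insert, PySem.Dict.getD_insert]
      simp [hc]
  · simp [PySem.Dict.getD_empty]
    ring

-- ===== VERDICT (by name: the statement is the Claim_ definition above) =====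
theorem solution_spec : Claim_equal_solution := by
  intro ss _ hpre
  exact solution_eq_alt ss hpre

theorem solution_raises : Claim_raises_solution := by
  unfold Claim_raises_solution
  exact ⟨fun ss _ hr hp => hp hr, by decide⟩

-- self-check: the crash-fix witness value read off solution_raises
theorem solution_raises_witness_ok : solution_alt pvRaiseWitness_solution = pvRaiseWitnessOut_solution :=
  solution_raises.2.2.2
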